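-- pv_equiv track=rewrite | github.com/diyarane/python-code-analyzer | analyzer.py | find_duplicate_code_blocks
-- ===== SOURCE A (Python) =====
-- def find_duplicate_code_blocks(source_code, block_size=5):
--     """Find repeated blocks of 5+ identical consecutive non-empty lines."""
--     lines = source_code.splitlines()
--     seen_blocks = {}
--     duplicates = []
--     reported_pairs = set()
--
--     if len(lines) < block_size:
--         return duplicates
--
--     for index in range(len(lines) - block_size + 1):
--         block = tuple(line.strip() for line in lines[index:index + block_size])
--         if any(not line for line in block):
--             continue
--
--         if block in seen_blocks:
--             first_start = seen_blocks[block]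
--             pair = (first_start, index)
--             if pair not in reported_pairs:
--                 duplicates.append(
--                     {
--                         "first_start": first_start + 1,
--                         "first_end": first_start + block_size,
--                         "duplicate_start": index + 1,
--                         "duplicate_end": index + block_size,
--                     }
--                 )
--                 reported_pairs.add(pair)
--         else:
--             seen_blocks[block] = index
--
--     return duplicates
-- ===== SOURCE B (Python) =====
-- def find_duplicate_code_blocks(source_code, block_size=5):
--     """Find repeated blocks of identical consecutive non-empty lines.
--
--     Two-pass decomposition: first build an index of each block's first
--     occurrence, then report every later occurrence in ascending order.
--     """
--     lines = source_code.splitlines()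
--     if len(lines) < block_size:
--         return []
--
--     n_windows = len(lines) - block_size + 1
--
--     first = {}
--     for i in range(n_windows):
--         block = tuple(line.strip() for line in lines[i:i + block_size])
--         if "" in block:
--             continue
--         if block not in first:
--             first[block] = i
--
--     result = []
--     for i in range(n_windows):
--         block = tuple(line.strip() for line in lines[i:i + block_size])
--         if "" in block:
--             continue
--         f = first[block]
--         if f < i:
--             result.append(
--                 {
--                     "first_start": f + 1,
--                     "first_end": f + block_size,
--                     "duplicate_start": i + 1,
--                     "duplicate_end": i + block_size,
--                 }
--             )
--     return result
-- ===== Notes on version B (the rewrite author's own statement) =====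
-- stated objective: alternative
-- what changed: Replaces A's single interleaved loop that updates a seen-dict, a reported-pairs set and the output list together with a two-pass decomposition: first build a first-occurrence index for every non-empty block, then a second pass reports each window whose stored first occurrence strictly precedes it; the reported-pairs set disappears entirely.
import Mathlib
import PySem

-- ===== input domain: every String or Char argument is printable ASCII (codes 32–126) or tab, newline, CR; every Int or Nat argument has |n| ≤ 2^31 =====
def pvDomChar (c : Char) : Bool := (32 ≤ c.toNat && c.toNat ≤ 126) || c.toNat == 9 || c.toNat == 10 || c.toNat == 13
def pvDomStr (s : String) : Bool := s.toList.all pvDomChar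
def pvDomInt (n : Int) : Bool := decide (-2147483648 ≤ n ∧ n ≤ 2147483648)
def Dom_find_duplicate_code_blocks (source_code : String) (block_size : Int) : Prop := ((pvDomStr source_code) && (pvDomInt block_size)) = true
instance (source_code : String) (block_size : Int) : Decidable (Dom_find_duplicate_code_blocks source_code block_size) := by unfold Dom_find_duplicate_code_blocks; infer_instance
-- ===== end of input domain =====

-- B replaces A's single interleaved detect-and-record loop with a build-first-occurrence-index
-- pass followed by a report pass (the reported-pairs set disappears); same cost, different decomposition.


-- ===== PORT A =====
-- single loop carrying (seen_blocks, reported_pairs, duplicates) as one state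
def find_duplicate_code_blocks (source_code : String) (block_size : Int) : List (List (String × Int)) :=
  let lines := PySem.Str.splitlines source_code
  if (lines.length : Int) < block_size then []
  else
    ((PySem.List.pyRange 0 ((lines.length : Int) - block_size + 1) 1).foldl
      (fun (st : PySem.Dict (List String) Int × PySem.Set (Int × Int) × List (List (String × Int))) index =>
        let block := (PySem.List.slice lines (some index) (some (index + block_size))).map PySem.Str.strip
        if block.any (fun line => line == "") then st
        else
          match st.1.get? block with
          | some first_start =>
            if (first_start, index) ∈ st.2.1 then st
            else (st.1, PySem.Set.add st.2.1 (first_start, index),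
                  st.2.2 ++ [[("first_start", first_start + 1), ("first_end", first_start + block_size),
                              ("duplicate_start", index + 1), ("duplicate_end", index + block_size)]])
          | none => (st.1.insert block index, st.2.1, st.2.2))
      (PySem.Dict.empty, PySem.Set.empty, [])).2.2

-- ===== PORT B =====
-- pass 1: map each non-empty stripped block to its first occurrence index
def fdcb_first_index (lines : List String) (block_size : Int) (idxs : List Int) :
    PySem.Dict (List String) Int :=
  idxs.foldl
    (fun first i =>
      let block := (PySem.List.slice lines (some i) (some (i + block_size))).map PySem.Str.strip
      if block.contains "" then first
      else if (first.get? block).isSome then first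
      else first.insert block i)
    PySem.Dict.empty

-- pass 2: report every window whose first occurrence strictly precedes it
def find_duplicate_code_blocks_alt (source_code : String) (block_size : Int) : List (List (String × Int)) :=
  let lines := PySem.Str.splitlines source_code
  if (lines.length : Int) < block_size then []
  else
    let idxs := PySem.List.pyRange 0 ((lines.length : Int) - block_size + 1) 1
    let first := fdcb_first_index lines block_size idxs
    idxs.foldl
      (fun result i =>
        let block := (PySem.List.slice lines (some i) (some (i + block_size))).map PySem.Str.strip
        if block.contains "" then result
        else
          match first.get? block with
          | some f =>
            if f < i then
              result ++ [[("first_start", f + 1), ("first_end", f + block_size),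
                          ("duplicate_start", i + 1), ("duplicate_end", i + block_size)]]
            else result
          | none => result)   -- unreachable: pass 1 indexed every non-empty block
      []

-- ===== PRECONDITION & SPEC =====
def Spec_find_duplicate_code_blocks (source_code : String) (block_size : Int) (out : List (List (String × Int))) : Prop := out = find_duplicate_code_blocks_alt source_code block_size
instance (source_code : String) (block_size : Int) (out : List (List (String × Int))) : Decidable (Spec_find_duplicate_code_blocks source_code block_size out) := by unfold Spec_find_duplicate_code_blocks; infer_instance

-- ===== CLAIM (what is proved, stated in full; the proofs are below) =====
def Claim_equal_find_duplicate_code_blocks : Prop := ∀ (source_code : String) (block_size : Int), Dom_find_duplicate_code_blocks source_code block_size → Spec_find_duplicate_code_blocks source_code block_size (find_duplicate_code_blocks source_code block_size)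

-- ===== LEMMAS AND PROOFS =====

-- B's pass-1 step, named for the proofs
def pvP1Step (lines : List String) (bs : Int) (first : PySem.Dict (List String) Int) (i : Int) :
    PySem.Dict (List String) Int :=
  let block := (PySem.List.slice lines (some i) (some (i + bs))).map PySem.Str.strip
  if block.contains "" then first
  else if (first.get? block).isSome then first
  else first.insert block i

def pvP1 (lines : List String) (bs : Int) (d : PySem.Dict (List String) Int) (l : List Int) :
    PySem.Dict (List String) Int :=
  l.foldl (pvP1Step lines bs) d

lemma fdcb_first_index_eq (lines : List String) (bs : Int) (l : List Int) :
    fdcb_first_index lines bs l = pvP1 lines bs PySem.Dict.empty l := rfl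

lemma pvP1_append (lines : List String) (bs : Int) (d : PySem.Dict (List String) Int)
    (l1 l2 : List Int) : pvP1 lines bs d (l1 ++ l2) = pvP1 lines bs (pvP1 lines bs d l1) l2 := by
  simp [pvP1, List.foldl_append]

lemma pvP1_cons (lines : List String) (bs : Int) (d : PySem.Dict (List String) Int)
    (i : Int) (t : List Int) :
    pvP1 lines bs d (i :: t) = pvP1 lines bs (pvP1Step lines bs d i) t := rfl

lemma pvP1_mono (lines : List String) (bs : Int) (l : List Int)
    (d : PySem.Dict (List String) Int) (b : List String) (f : Int)
    (h : d.get? b = some f) : (pvP1 lines bs d l).get? b = some f := by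
  induction l generalizing d with
  | nil => exact h
  | cons i t ih =>
    rw [pvP1_cons]
    apply ih
    unfold pvP1Step
    cases hc : (((PySem.List.slice lines (some i) (some (i + bs))).map PySem.Str.strip).contains "") with
    | true => rw [if_pos hc]; exact h
    | false =>
      rw [if_neg (by rw [hc]; exact Bool.false_ne_true)]
      cases hs : (d.get? ((PySem.List.slice lines (some i) (some (i + bs))).map PySem.Str.strip)).isSome with
      | true => rw [if_pos rfl]; exact h
      | false =>
        rw [if_neg Bool.false_ne_true]
        have hne : b ≠ (PySem.List.slice lines (some i) (some (i + bs))).map PySem.Str.strip := by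
          intro he; rw [he] at h; simp [h] at hs
        rw [PySem.Dict.get?_insert_of_ne _ _ hne]; exact h

lemma pvP1_vals (lines : List String) (bs : Int) (l : List Int)
    (d : PySem.Dict (List String) Int) (b : List String) (f : Int)
    (h : (pvP1 lines bs d l).get? b = some f) : d.get? b = some f ∨ f ∈ l := by
  induction l generalizing d with
  | nil => exact Or.inl h
  | cons i t ih =>
    rw [pvP1_cons] at h
    rcases ih _ h with h' | h'
    · unfold pvP1Step at h'
      cases hc : (((PySem.List.slice lines (some i) (some (i + bs))).map PySem.Str.strip).contains "") with
      | true => rw [if_pos hc] at h'; exact Or.inl h'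
      | false =>
        rw [if_neg (by rw [hc]; exact Bool.false_ne_true)] at h'
        cases hs : (d.get? ((PySem.List.slice lines (some i) (some (i + bs))).map PySem.Str.strip)).isSome with
        | true => rw [if_pos hs] at h'; exact Or.inl h'
        | false =>
          rw [if_neg (by rw [hs]; exact Bool.false_ne_true)] at h'
          rw [PySem.Dict.get?_insert] at h'
          by_cases hb : b = (PySem.List.slice lines (some i) (some (i + bs))).map PySem.Str.strip
          · rw [if_pos hb] at h'
            exact Or.inr (by simp at h'; simp [h'])
          · rw [if_neg hb] at h'; exact Or.inl h'
    · exact Or.inr (List.mem_cons_of_mem _ h')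

-- `"" in block` (B) and `any(not line …)` (A) compute the same bool
lemma contains_eq_any (l : List String) : (l.contains "") = l.any (fun line => line == "") := by
  simp [List.any_beq']

-- A's loop step
def pvAS (lines : List String) (bs : Int)
    (st : PySem.Dict (List String) Int × PySem.Set (Int × Int) × List (List (String × Int)))
    (index : Int) :
    PySem.Dict (List String) Int × PySem.Set (Int × Int) × List (List (String × Int)) :=
  let block := (PySem.List.slice lines (some index) (some (index + bs))).map PySem.Str.strip
  if block.any (fun line => line == "") then st
  else
    match st.1.get? block with
    | some first_start =>
      if (first_start, index) ∈ st.2.1 then st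
      else (st.1, PySem.Set.add st.2.1 (first_start, index),
            st.2.2 ++ [[("first_start", first_start + 1), ("first_end", first_start + bs),
                        ("duplicate_start", index + 1), ("duplicate_end", index + bs)]])
    | none => (st.1.insert block index, st.2.1, st.2.2)

-- B's pass-2 step (with the full first-occurrence dict Fd)
def pvBS (lines : List String) (bs : Int) (Fd : PySem.Dict (List String) Int)
    (result : List (List (String × Int))) (i : Int) : List (List (String × Int)) :=
  let block := (PySem.List.slice lines (some i) (some (i + bs))).map PySem.Str.strip
  if block.contains "" then result
  else
    match Fd.get? block with
    | some f =>
      if f < i then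
        result ++ [[("first_start", f + 1), ("first_end", f + bs),
                    ("duplicate_start", i + 1), ("duplicate_end", i + bs)]]
      else result
    | none => result

-- main invariant: after the first j windows, A's state is (B's pass-1 dict, some pair set
-- whose second components are < j, B's pass-2 output)
lemma pvMain (lines : List String) (bs m : Int) (Fd : PySem.Dict (List String) Int)
    (hF : Fd = pvP1 lines bs PySem.Dict.empty (PySem.List.pyRange 0 m 1)) :
    ∀ (j : Nat), (j : Int) ≤ m →
      ∃ R, (PySem.List.pyRange 0 (j : Int) 1).foldl (pvAS lines bs)
              (PySem.Dict.empty, PySem.Set.empty, []) =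
            (pvP1 lines bs PySem.Dict.empty (PySem.List.pyRange 0 (j : Int) 1), R,
             (PySem.List.pyRange 0 (j : Int) 1).foldl (pvBS lines bs Fd) [])
          ∧ ∀ p ∈ R, p.2 < (j : Int) := by
  intro j
  induction j with
  | zero =>
    intro _
    refine ⟨PySem.Set.empty, ?_, ?_⟩
    · simp [PySem.List.pyRange_one_eq_nil (le_refl (0:Int)), pvP1]
    · intro p hp; simp [PySem.Set.empty] at hp
  | succ j ih =>
    intro hj1
    have hj : (j : Int) ≤ m := by push_cast at hj1 ⊢; omega
    have hjm : (j : Int) < m := by push_cast at hj1; omega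
    obtain ⟨R, hEq, hR⟩ := ih hj
    have hsplit : PySem.List.pyRange 0 ((j : Nat) + 1 : ℕ) 1
        = PySem.List.pyRange 0 (j : Int) 1 ++ [(j : Int)] := by
      push_cast
      exact PySem.List.pyRange_one_succ_right (by positivity)
    set b := (PySem.List.slice lines (some (j:Int)) (some ((j:Int) + bs))).map PySem.Str.strip with hbdef
    set Dj := pvP1 lines bs PySem.Dict.empty (PySem.List.pyRange 0 (j : Int) 1) with hDj
    set Oj := (PySem.List.pyRange 0 (j : Int) 1).foldl (pvBS lines bs Fd) [] with hOj
    have hFd : Fd = pvP1 lines bs Dj (PySem.List.pyRange (j : Int) m 1) := by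
      rw [hF, PySem.List.pyRange_one_append 0 (j:Int) m (by positivity) hj, pvP1_append]
    have hA : (PySem.List.pyRange 0 ((j : Nat) + 1 : ℕ) 1).foldl (pvAS lines bs)
        (PySem.Dict.empty, PySem.Set.empty, []) = pvAS lines bs (Dj, R, Oj) (j : Int) := by
      rw [hsplit, List.foldl_append, hEq]; rfl
    have hD1 : pvP1 lines bs PySem.Dict.empty (PySem.List.pyRange 0 ((j : Nat) + 1 : ℕ) 1)
        = pvP1Step lines bs Dj (j : Int) := by
      rw [hsplit, pvP1_append, ← hDj]; rfl
    have hO1 : (PySem.List.pyRange 0 ((j : Nat) + 1 : ℕ) 1).foldl (pvBS lines bs Fd) []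
        = pvBS lines bs Fd Oj (j : Int) := by
      rw [hsplit, List.foldl_append, ← hOj]; rfl
    rw [hA, hD1, hO1]
    by_cases hc : (b.contains "") = true
    · -- empty line inside the block: all three skip
      have hany : b.any (fun line => line == "") = true := by rw [← contains_eq_any]; exact hc
      refine ⟨R, ?_, ?_⟩
      · simp only [pvAS, pvBS, pvP1Step, ← hbdef, hany, hc, if_true]
      · intro p hp; have := hR p hp; push_cast; omega
    · have hany : b.any (fun line => line == "") = false := by
        rw [← contains_eq_any]; simpa using hc
      cases hget : Dj.get? b with
      | some fs =>
        -- duplicate window: A records it; B's pass 2 records the same entry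
        have hfs : fs < (j : Int) := by
          rcases pvP1_vals lines bs _ _ _ _ (hDj ▸ hget) with h | h
          · simp [PySem.Dict.empty, PySem.Dict.get?] at h
          · exact ((PySem.List.mem_pyRange_one).1 h).2
        have hFget : Fd.get? b = some fs := by rw [hFd]; exact pvP1_mono _ _ _ _ _ _ hget
        have hnotmem : ¬ ((fs, (j : Int)) ∈ R) :=
          fun hmem => lt_irrefl _ (hR _ hmem)
        refine ⟨PySem.Set.add R (fs, (j : Int)), ?_, ?_⟩
        · simp only [pvAS, pvBS, pvP1Step, ← hbdef, hany, hc, hget, hFget, hnotmem,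
            Bool.false_eq_true, if_false, if_true, Option.isSome_some, if_pos hfs]
        · intro p hp
          rcases (PySem.Set.mem_add R (fs, (j : Int)) p).1 hp with h | h
          · have := hR p h; push_cast; omega
          · subst h; push_cast; omega
      | none =>
        -- first occurrence: A stores it; B's pass-1 dict stores it; pass 2 skips (f = i)
        have hFget : Fd.get? b = some (j : Int) := by
          rw [hFd, PySem.List.pyRange_one_cons hjm, pvP1_cons]
          have hstep : pvP1Step lines bs Dj (j : Int) = Dj.insert b (j : Int) := by
            unfold pvP1Step
            rw [← hbdef, if_neg hc, if_neg (by simp [hget])]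
          rw [hstep]
          exact pvP1_mono _ _ _ _ _ _ (PySem.Dict.get?_insert_self Dj b (j : Int))
        refine ⟨R, ?_, ?_⟩
        · simp only [pvAS, pvBS, pvP1Step, ← hbdef, hany, hc, hget, hFget,
            Bool.false_eq_true, if_false, Option.isSome_none, lt_irrefl]
        · intro p hp; have := hR p hp; push_cast; omega

-- ===== VERDICT (by name: the statement is the Claim_ definition above) =====
theorem find_duplicate_code_blocks_spec : Claim_equal_find_duplicate_code_blocks := by
  intro source_code block_size _
  unfold Spec_find_duplicate_code_blocks
  unfold find_duplicate_code_blocks find_duplicate_code_blocks_alt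
  set lines := PySem.Str.splitlines source_code with hl
  by_cases hlt : ((lines.length : Int) < block_size)
  · simp [hlt]
  · simp only [hlt, if_false]
    set m : Int := (lines.length : Int) - block_size + 1 with hm
    have hm0 : 0 ≤ m := by simp at hlt; omega
    have hcast : ((m.toNat : Nat) : Int) = m := Int.toNat_of_nonneg hm0
    obtain ⟨R, hEq, _⟩ := pvMain lines block_size m
      (fdcb_first_index lines block_size (PySem.List.pyRange 0 m 1))
      (fdcb_first_index_eq ..) m.toNat (by omega)
    rw [hcast] at hEq
    have : ((PySem.List.pyRange 0 m 1).foldl (pvAS lines block_size)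
        (PySem.Dict.empty, PySem.Set.empty, [])).2.2
        = (PySem.List.pyRange 0 m 1).foldl
            (pvBS lines block_size (fdcb_first_index lines block_size (PySem.List.pyRange 0 m 1))) [] := by
      rw [hEq]
    exact this
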